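-- pv_equiv track=rewrite | github.com/OhadRaviv845/Projects | Introduction to programming in Python/EX5/language_classifier.py | compute_ngram_distance
-- ===== SOURCE A (Python) =====
-- def compute_ngram_distance(dict1, dict2):
--     difference = 0
--     for key in dict1:
--         if key in dict2:
--             difference += (dict1[key] - dict2[key]) ** 2
--         else:
--             difference += dict1[key] ** 2
--     for key in dict2:
--         if not key in dict1:
--             difference += dict2[key] ** 2
--     return difference
-- ===== SOURCE B (Python) =====
-- def compute_ngram_distance(dict1, dict2):
--     delta = dict(dict1)
--     for key, value in dict2.items():
--         delta[key] = delta.get(key, 0) - value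
--     return sum(v * v for v in delta.values())
-- ===== Notes on version B (the rewrite author's own statement) =====
-- stated objective: alternative
-- what changed: Instead of A's two loops with explicit membership branches accumulating a running sum, B first materialises an intermediate difference dictionary (a copy of dict1 from which each dict2 count is subtracted, missing keys defaulting to 0) and only then sums the squares of that dictionary's values in a separate pass.
import Mathlib
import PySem

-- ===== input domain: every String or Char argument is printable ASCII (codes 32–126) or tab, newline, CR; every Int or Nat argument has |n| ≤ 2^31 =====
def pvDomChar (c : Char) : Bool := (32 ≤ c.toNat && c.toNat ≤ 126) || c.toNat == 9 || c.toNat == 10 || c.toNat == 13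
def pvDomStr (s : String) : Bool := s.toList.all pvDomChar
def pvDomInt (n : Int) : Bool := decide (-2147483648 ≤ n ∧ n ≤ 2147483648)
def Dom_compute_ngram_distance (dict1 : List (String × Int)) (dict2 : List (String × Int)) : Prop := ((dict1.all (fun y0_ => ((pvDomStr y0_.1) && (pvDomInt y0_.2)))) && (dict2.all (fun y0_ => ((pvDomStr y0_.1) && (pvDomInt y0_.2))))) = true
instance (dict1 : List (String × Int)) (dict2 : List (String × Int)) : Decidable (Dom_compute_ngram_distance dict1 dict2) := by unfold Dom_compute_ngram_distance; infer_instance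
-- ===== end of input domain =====

-- B replaces A's two membership-branching accumulation loops by building an intermediate
-- difference dictionary (dict1 minus dict2, missing keys default 0) and then summing the
-- squares of its values (objective: alternative; same cost).

-- ===== PORT A =====
-- d[k] / d.get(k, 0): first matching key (exact for dicts, whose keys are unique — see Pre_).
def pvGet0 (d : List (String × Int)) (k : String) : Int :=
  match d.find? (fun p => p.1 == k) with
  | some p => p.2
  | none => 0

def compute_ngram_distance (dict1 : List (String × Int)) (dict2 : List (String × Int)) : Int :=
  -- difference = 0; for key in dict1: …
  let difference : Int := dict1.foldl (fun difference p =>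
    if dict2.any (fun q => q.1 == p.1) then
      difference + (pvGet0 dict1 p.1 - pvGet0 dict2 p.1) ^ 2
    else
      difference + (pvGet0 dict1 p.1) ^ 2) 0
  -- for key in dict2: if not key in dict1: …
  dict2.foldl (fun difference p =>
    if !(dict1.any (fun q => q.1 == p.1)) then
      difference + (pvGet0 dict2 p.1) ^ 2
    else difference) difference

-- ===== PORT B =====
def compute_ngram_distance_alt (dict1 : List (String × Int)) (dict2 : List (String × Int)) : Int :=
  -- delta = dict(dict1)
  let delta : PySem.Dict String Int := PySem.Dict.ofList dict1
  -- for key, value in dict2.items(): delta[key] = delta.get(key, 0) - value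
  let delta := dict2.foldl (fun d p => d.insert p.1 (d.getD p.1 0 - p.2)) delta
  -- return sum(v * v for v in delta.values())
  (delta.values.map (fun v => v * v)).sum

-- ===== PRECONDITION & SPEC =====
-- Pre_ excludes association lists with duplicate keys: those do not encode any Python dict
-- (a Python dict has unique keys), so A's behaviour there is an artefact of the encoding.
def Pre_compute_ngram_distance (dict1 : List (String × Int)) (dict2 : List (String × Int)) : Prop :=
  (dict1.map Prod.fst).Nodup ∧ (dict2.map Prod.fst).Nodup
instance (dict1 : List (String × Int)) (dict2 : List (String × Int)) : Decidable (Pre_compute_ngram_distance dict1 dict2) := by unfold Pre_compute_ngram_distance; infer_instance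

def pvWitness_compute_ngram_distance : (List (String × Int)) × (List (String × Int)) :=
  ([("ab", 3), ("cd", -1)], [("cd", 2), ("e", 4)])

def Spec_compute_ngram_distance (dict1 : List (String × Int)) (dict2 : List (String × Int)) (out : Int) : Prop := out = compute_ngram_distance_alt dict1 dict2
instance (dict1 : List (String × Int)) (dict2 : List (String × Int)) (out : Int) : Decidable (Spec_compute_ngram_distance dict1 dict2 out) := by unfold Spec_compute_ngram_distance; infer_instance

-- ===== CLAIM (what is proved, stated in full; the proofs are below) =====
def Claim_equal_compute_ngram_distance : Prop := ∀ (dict1 : List (String × Int)) (dict2 : List (String × Int)), Dom_compute_ngram_distance dict1 dict2 → Pre_compute_ngram_distance dict1 dict2 → Spec_compute_ngram_distance dict1 dict2 (compute_ngram_distance dict1 dict2)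

-- ===== LEMMAS AND PROOFS =====

-- missing key gives get 0
theorem pvGet0_of_not_mem (d : List (String × Int)) (k : String)
    (h : d.any (fun q => q.1 == k) = false) : pvGet0 d k = 0 := by
  unfold pvGet0
  have : d.find? (fun p => p.1 == k) = none := by
    rw [List.find?_eq_none]
    intro p hp
    have := List.any_eq_false.mp h p hp
    simpa using this
  simp [this]

-- under nodup keys, a present pair is what lookup returns
theorem pvGet0_of_mem (d : List (String × Int)) (k : String) (v : Int)
    (hnd : (d.map Prod.fst).Nodup) (hp : (k, v) ∈ d) : pvGet0 d k = v := by
  induction d with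
  | nil => cases hp
  | cons q t ih =>
    rw [List.map_cons, List.nodup_cons] at hnd
    obtain ⟨hq, ht⟩ := hnd
    rw [List.mem_cons] at hp
    rcases hp with hp | hp
    · rw [← hp]; simp [pvGet0, List.find?]
    · have hne : (q.1 == k) = false := by
        rw [beq_eq_false_iff_ne]
        intro h
        exact hq (h ▸ List.mem_map_of_mem hp)
      simp only [pvGet0, List.find?, hne]
      exact ih ht hp

-- the key list of dict(dict1) and its membership test
theorem pvGet0_cons_ne (a : String × Int) (t : List (String × Int)) (k : String)
    (h : (a.1 == k) = false) : pvGet0 (a :: t) k = pvGet0 t k := by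
  simp only [pvGet0, List.find?, h]

-- the B loop: characterises the items of the difference dictionary
theorem delta_items (l2 : List (String × Int)) (δ : PySem.Dict String Int)
    (hδ : δ.keys.Nodup) (h2 : (l2.map Prod.fst).Nodup) :
    (l2.foldl (fun d p => d.insert p.1 (d.getD p.1 0 - p.2)) δ).items
      = δ.items.map (fun p => (p.1, p.2 - pvGet0 l2 p.1))
        ++ (l2.filter (fun q => !δ.contains q.1)).map (fun q => (q.1, 0 - q.2)) := by
  induction l2 generalizing δ with
  | nil => simp [pvGet0]
  | cons a t ih =>
    rw [List.map_cons, List.nodup_cons] at h2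
    obtain ⟨ha, ht⟩ := h2
    have hat : pvGet0 t a.1 = 0 := by
      apply pvGet0_of_not_mem
      rw [List.any_eq_false]
      intro q hq
      rw [Bool.not_eq_true, beq_eq_false_iff_ne]
      intro h
      exact ha (h ▸ List.mem_map_of_mem hq)
    have hfilt : t.filter (fun q => !(δ.insert a.1 (δ.getD a.1 0 - a.2)).contains q.1)
        = t.filter (fun q => !δ.contains q.1) := by
      apply List.filter_congr
      intro q hq
      have hne : q.1 ≠ a.1 := fun h => ha (h ▸ List.mem_map_of_mem hq)
      rw [PySem.Dict.contains_insert]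
      simp [hne]
    rw [List.foldl_cons, ih _ (PySem.Dict.nodup_keys_insert _ _ _ hδ) ht, hfilt,
        List.filter_cons]
    by_cases hc : δ.contains a.1 = true
    · -- a.1 already a key: insert overwrites in place, the filter drops a
      rw [PySem.Dict.items_insert, if_pos hc, List.map_map]
      simp only [hc, Bool.not_true, Bool.false_eq_true, if_false]
      congr 1
      apply List.map_congr_left
      rintro ⟨pk, pv⟩ hp
      by_cases hpk : pk = a.1
      · subst hpk
        have hpv : δ.getD a.1 0 = pv := by
          apply PySem.Dict.getD_of_mem_items <;> assumption
        have hcons : pvGet0 (a :: t) a.1 = a.2 := by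
          simp [pvGet0, List.find?]
        simp only [Function.comp_apply, beq_self_eq_true, if_true, hcons, hpv, hat]
        simp
      · have hne : (pk == a.1) = false := by rwa [beq_eq_false_iff_ne]
        have hne' : (a.1 == pk) = false := by
          rw [beq_eq_false_iff_ne]; exact fun h => hpk h.symm
        simp only [Function.comp_apply, hne, Bool.false_eq_true, if_false,
          pvGet0_cons_ne a t pk hne']
    · -- a.1 fresh: insert appends, the filter keeps a
      have hc' : δ.contains a.1 = false := by simpa using hc
      have hg : δ.getD a.1 0 = 0 := by
        rw [PySem.Dict.getD_of_not_contains] <;> try exact hc'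
      rw [PySem.Dict.items_insert, if_neg (by simp [hc']), hg, List.map_append]
      simp only [hc', Bool.not_false, if_true, List.map_cons]
      have hmapδ : δ.items.map (fun p => (p.1, p.2 - pvGet0 t p.1))
          = δ.items.map (fun p => (p.1, p.2 - pvGet0 (a :: t) p.1)) := by
        apply List.map_congr_left
        intro p hp
        have hne : (a.1 == p.1) = false := by
          rw [beq_eq_false_iff_ne]
          intro h
          have hmem : a.1 ∈ δ.keys := by
            rw [h]
            apply PySem.Dict.mem_keys_of_mem_items <;> assumption
          rw [← PySem.Dict.contains_iff_mem_keys, hc'] at hmem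
          cases hmem
        rw [pvGet0_cons_ne a t p.1 hne]
      rw [hmapδ]
      simp [hat]

-- a map-sum over an if equals the sum over the filtered list
theorem sum_map_ite {α : Type} (l : List α) (c : α → Bool) (f : α → Int) :
    (l.map (fun x => if c x then 0 else f x)).sum
      = ((l.filter (fun x => !c x)).map f).sum := by
  induction l with
  | nil => simp
  | cons x t ih =>
    by_cases h : c x = true <;> simp [h, ih]

-- dict(dict1) on a duplicate-free association list is that list
theorem ofList_items (d : List (String × Int)) (hnd : (d.map Prod.fst).Nodup) :
    (PySem.Dict.ofList d).items = d := by
  have h := PySem.Dict.items_foldl_insert_fresh (d := PySem.Dict.empty)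
      (l := d) (k := Prod.fst) (v := Prod.snd)
      (by intro a _; simp) (by simpa using hnd)
  simpa using h

-- ===== VERDICT (by name: the statement is the Claim_ definition above) =====
theorem compute_ngram_distance_spec : Claim_equal_compute_ngram_distance := by
  intro dict1 dict2 _ hpre
  rcases hpre with ⟨h1, h2⟩
  unfold Spec_compute_ngram_distance compute_ngram_distance compute_ngram_distance_alt
  -- A's first loop: every step adds (pvGet0 dict1 k - pvGet0 dict2 k)^2
  have step1 : (fun (difference : Int) (p : String × Int) =>
      if dict2.any (fun q => q.1 == p.1) then
        difference + (pvGet0 dict1 p.1 - pvGet0 dict2 p.1) ^ 2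
      else
        difference + (pvGet0 dict1 p.1) ^ 2)
      = fun difference p => difference + (pvGet0 dict1 p.1 - pvGet0 dict2 p.1) ^ 2 := by
    funext difference p
    rcases hb : dict2.any (fun q => q.1 == p.1) with _ | _
    · have h0 : pvGet0 dict2 p.1 = 0 := pvGet0_of_not_mem _ _ hb
      simp [h0]
    · simp
  -- A's second loop adds (if key in dict1 then 0 else pvGet0 dict2 k ^ 2)
  have step2 : (fun (difference : Int) (p : String × Int) =>
      if !(dict1.any (fun q => q.1 == p.1)) then
        difference + (pvGet0 dict2 p.1) ^ 2
      else difference)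
      = fun difference p =>
          difference + (if dict1.any (fun q => q.1 == p.1) then 0 else (pvGet0 dict2 p.1) ^ 2) := by
    funext difference p
    rcases hb : dict1.any (fun q => q.1 == p.1) with _ | _ <;> simp only [hb,
      Bool.not_false, Bool.not_true, Bool.false_eq_true, if_false, if_true, add_zero]
  rw [step1, step2, PySem.List.foldl_add, PySem.List.foldl_add]
  -- B's delta dictionary, characterised
  have hnd0 : (PySem.Dict.ofList dict1).keys.Nodup := by
    show ((PySem.Dict.ofList dict1).items.map Prod.fst).Nodup
    rw [ofList_items dict1 h1]; exact h1
  have hδ := delta_items dict2 (PySem.Dict.ofList dict1) hnd0 h2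
  rw [ofList_items dict1 h1] at hδ
  show _ = ((_ : PySem.Dict String Int).items.map Prod.snd |>.map _).sum
  rw [hδ]
  -- delta's membership test is A's membership test
  have hfe : dict2.filter (fun q => !(PySem.Dict.ofList dict1).contains q.1)
      = dict2.filter (fun x => !dict1.any (fun q => q.1 == x.1)) := by
    apply List.filter_congr
    intro q _
    have hk : (PySem.Dict.ofList dict1).keys = dict1.map Prod.fst := by
      show (PySem.Dict.ofList dict1).items.map Prod.fst = _
      rw [ofList_items dict1 h1]
    have hcq : (PySem.Dict.ofList dict1).contains q.1 = dict1.any (fun r => r.1 == q.1) := by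
      rw [Bool.eq_iff_iff, PySem.Dict.contains_iff_mem_keys, hk]
      simp [List.mem_map, List.any_eq_true]
    rw [hcq]
  rw [hfe]
  simp only [List.map_append, List.map_map, Function.comp_def, List.sum_append]
  -- the two remaining sums agree pointwise
  have e1 : dict1.map (fun p : String × Int =>
        (p.2 - pvGet0 dict2 p.1) * (p.2 - pvGet0 dict2 p.1))
      = dict1.map (fun p => (pvGet0 dict1 p.1 - pvGet0 dict2 p.1) ^ 2) := by
    apply List.map_congr_left
    rintro ⟨pk, pv⟩ hp
    have := pvGet0_of_mem dict1 pk pv h1 hp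
    simp only [this]
    ring
  have e2 : (dict2.filter (fun x => !dict1.any (fun q => q.1 == x.1))).map
        (fun q : String × Int => (0 - q.2) * (0 - q.2))
      = (dict2.filter (fun x => !dict1.any (fun q => q.1 == x.1))).map
        (fun p => (pvGet0 dict2 p.1) ^ 2) := by
    apply List.map_congr_left
    rintro ⟨pk, pv⟩ hp
    have := pvGet0_of_mem dict2 pk pv h2 (List.mem_of_mem_filter hp)
    simp only [this]
    ring
  rw [e1, e2, sum_map_ite dict2 (fun p => dict1.any (fun q => q.1 == p.1))
        (fun p => (pvGet0 dict2 p.1) ^ 2)]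
  ring
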